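-- pv_equiv track=rewrite | github.com/fidemin/adventofcode | 2023/day01/solution2.py | extract_digit_of_string_from_current_as_start
-- ===== SOURCE A (Python) =====
-- digit_string_to_digit = {
--     'one': 1,
--     'two': 2,
--     'three': 3,
--     'four': 4,
--     'five': 5,
--     'six': 6,
--     'seven': 7,
--     'eight': 8,
--     'nine': 9
-- }
--
-- digit_string_tree = {
--     'o': ['one'],
--     't': ['two', 'three'],
--     'f': ['four', 'five'],
--     's': ['six', 'seven'],
--     'e': ['eight'],
--     'n': ['nine']
-- }
--
-- def extract_digit_of_string_from_current_as_start(string: str, current: int):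
--     char = string[current]
--
--     if char not in digit_string_tree:
--         return None
--
--     digit_strs = digit_string_tree[char]
--     str_start = current
--
--     for digit_str in digit_strs:
--         str_end = str_start + len(digit_str)
--         if str_end > len(string):
--             return None
--         possible_digit_str = string[str_start:str_end]
--         if digit_str == possible_digit_str:
--             return digit_string_to_digit[digit_str]
-- ===== SOURCE B (Python) =====
-- # Same module constant A uses.
-- digit_string_to_digit = {
--     'one': 1,
--     'two': 2,
--     'three': 3,
--     'four': 4,
--     'five': 5,
--     'six': 6,
--     'seven': 7,
--     'eight': 8,
--     'nine': 9
-- }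
--
--
-- def extract_digit_of_string_from_current_as_start(string: str, current: int):
--     string[current]  # same IndexError as A when current is out of range
--     # Flat scan: no digit word is a prefix of another, so at most one word can
--     # match at a given position and no first-char dispatch tree is needed.
--     for word, digit in digit_string_to_digit.items():
--         if string[current:current + len(word)] == word:
--             return digit
--     return None
-- ===== Notes on version B (the rewrite author's own statement) =====
-- stated objective: simpler
-- what changed: Replaced the two-level first-char prefix-tree dispatch (with its length-based early returns and a second dict lookup to recover the digit) by a single flat scan over the nine (word, digit) pairs comparing the slice at the current position; correct because no digit word is a prefix of another.
import Mathlib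
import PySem

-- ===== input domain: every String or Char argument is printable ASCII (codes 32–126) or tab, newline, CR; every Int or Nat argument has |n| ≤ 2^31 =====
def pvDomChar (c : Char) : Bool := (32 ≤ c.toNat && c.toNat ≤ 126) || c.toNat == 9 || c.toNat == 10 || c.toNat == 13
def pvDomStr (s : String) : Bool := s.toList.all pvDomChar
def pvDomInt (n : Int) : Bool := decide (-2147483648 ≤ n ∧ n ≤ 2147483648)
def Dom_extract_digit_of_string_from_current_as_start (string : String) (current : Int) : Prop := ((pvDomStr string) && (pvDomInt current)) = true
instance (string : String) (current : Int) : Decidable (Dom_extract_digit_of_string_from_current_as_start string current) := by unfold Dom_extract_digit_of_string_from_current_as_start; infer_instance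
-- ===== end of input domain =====

-- B replaces A's two-level first-char prefix-tree dispatch by a single flat scan over the
-- nine (word, digit) pairs (simpler; correct since no digit word is a prefix of another).

-- ===== PORT A =====
-- module constant digit_string_to_digit (shared: A looks keys up in it, B iterates its items)
def pvDigitDict : PySem.Dict (List Char) Int :=
  PySem.Dict.ofList
    [(['o','n','e'], 1), (['t','w','o'], 2), (['t','h','r','e','e'], 3),
     (['f','o','u','r'], 4), (['f','i','v','e'], 5), (['s','i','x'], 6),
     (['s','e','v','e','n'], 7), (['e','i','g','h','t'], 8), (['n','i','n','e'], 9)]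

-- module constant digit_string_tree
def pvTree : PySem.Dict Char (List (List Char)) :=
  PySem.Dict.ofList
    [('o', [['o','n','e']]), ('t', [['t','w','o'], ['t','h','r','e','e']]),
     ('f', [['f','o','u','r'], ['f','i','v','e']]), ('s', [['s','i','x'], ['s','e','v','e','n']]),
     ('e', [['e','i','g','h','t']]), ('n', [['n','i','n','e']])]

-- the 'for digit_str in digit_strs' loop of A
def pvLoopA (string : String) (str_start : Int) : List (List Char) → Option Int
  | [] => none
  | digit_str :: rest =>
    let str_end : Int := str_start + digit_str.length
    if str_end > PySem.Str.len string then none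
    else
      let possible_digit_str := PySem.List.slice string.toList (some str_start) (some str_end)
      if digit_str = possible_digit_str then some (PySem.Dict.getD pvDigitDict digit_str 0)
      else pvLoopA string str_start rest

def extract_digit_of_string_from_current_as_start (string : String) (current : Int) : Option Int :=
  match PySem.Str.pyGet? string current with
  | none => none   -- IndexError in Python; excluded by Pre_
  | some char =>
    match PySem.Dict.get? pvTree char with
    | none => none
    | some digit_strs => pvLoopA string current digit_strs

-- ===== PORT B =====
-- the 'for word, digit in digit_string_to_digit.items()' loop of B
def pvLoopB (string : String) (current : Int) : List (List Char × Int) → Option Int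
  | [] => none
  | (word, digit) :: rest =>
    if PySem.List.slice string.toList (some current) (some (current + word.length)) = word then
      some digit
    else pvLoopB string current rest

def extract_digit_of_string_from_current_as_start_alt (string : String) (current : Int) : Option Int :=
  match PySem.Str.pyGet? string current with
  | none => none   -- IndexError in Python; excluded by Pre_
  | some _ => pvLoopB string current (PySem.Dict.items pvDigitDict)

-- ===== PRECONDITION & SPEC =====
-- Pre_: current must be a valid Python index into string; outside it A raises IndexError.
def Pre_extract_digit_of_string_from_current_as_start (string : String) (current : Int) : Prop :=
  PySem.Raise.InRange string.toList.length current
instance (string : String) (current : Int) : Decidable (Pre_extract_digit_of_string_from_current_as_start string current) := by unfold Pre_extract_digit_of_string_from_current_as_start; infer_instance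

def pvWitness_extract_digit_of_string_from_current_as_start : String × Int := ("xone", 1)

def Spec_extract_digit_of_string_from_current_as_start (string : String) (current : Int) (out : Option Int) : Prop := out = extract_digit_of_string_from_current_as_start_alt string current
instance (string : String) (current : Int) (out : Option Int) : Decidable (Spec_extract_digit_of_string_from_current_as_start string current out) := by unfold Spec_extract_digit_of_string_from_current_as_start; infer_instance

-- ===== CLAIM (what is proved, stated in full; the proofs are below) =====
def Claim_equal_extract_digit_of_string_from_current_as_start : Prop := ∀ (string : String) (current : Int), Dom_extract_digit_of_string_from_current_as_start string current → Pre_extract_digit_of_string_from_current_as_start string current → Spec_extract_digit_of_string_from_current_as_start string current (extract_digit_of_string_from_current_as_start string current)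

-- ===== LEMMAS AND PROOFS =====

-- effective index: for an in-range current, clampIdx agrees with Python's index resolution
lemma pv_clamp_idx (n : ℕ) (current : Int) (h : PySem.Raise.InRange n current) :
    PySem.List.pyIdx? n current = some (PySem.List.clampIdx n current) := by
  obtain ⟨h1, h2⟩ := h
  unfold PySem.List.pyIdx? PySem.List.clampIdx
  split_ifs <;> first
    | omega
    | (congr 1; omega)

lemma pv_get_clamp (L : List Char) (current : Int) (ch : Char)
    (h : PySem.List.pyGet? L current = some ch) :
    L[PySem.List.clampIdx L.length current]? = some ch := by
  have hr : PySem.Raise.InRange L.length current := by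
    by_contra hc
    rw [← PySem.List.pyGet?_eq_none_iff L current] at hc
    rw [h] at hc; cases hc
  unfold PySem.List.pyGet? at h
  rw [pv_clamp_idx L.length current hr] at h
  simpa using h

-- any slice starting at an in-range current that equals a nonempty list starts with string[current]
lemma pv_slice_head (L : List Char) (current : Int) (ch : Char)
    (h : PySem.List.pyGet? L current = some ch) (m : Int) (w : List Char) (hw : w ≠ [])
    (heq : PySem.List.slice L (some current) (some m) = w) : w.head? = some ch := by
  have hget := pv_get_clamp L current ch h
  have hsl : PySem.List.slice L (some current) (some m) =
      List.take (PySem.List.clampIdx L.length m - PySem.List.clampIdx L.length current)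
        (List.drop (PySem.List.clampIdx L.length current) L) := rfl
  rw [hsl] at heq
  by_cases ht : PySem.List.clampIdx L.length m - PySem.List.clampIdx L.length current = 0
  · rw [ht, List.take_zero] at heq; exact absurd heq.symm hw
  · rw [← heq, List.head?_take, List.head?_drop, if_neg ht]; exact hget

-- a word not starting with string[current] never matches the slice at current
lemma pv_no_head (L : List Char) (current : Int) (ch : Char)
    (h : PySem.List.pyGet? L current = some ch) (m : Int) (w : List Char) (c0 : Char)
    (hw : w.head? = some c0) (hne : c0 ≠ ch) :
    PySem.List.slice L (some current) (some m) ≠ w := by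
  intro heq
  have hh := pv_slice_head L current ch h m w (by intro h'; subst h'; cases hw) heq
  rw [hw] at hh
  exact hne (Option.some_inj.mp hh)

-- a word that would run past the end of the string never matches the slice at current
lemma pv_no_len (L : List Char) (current : Int) (w : List Char)
    (hr : PySem.Raise.InRange L.length current)
    (hgt : (L.length : Int) < current + w.length) :
    PySem.List.slice L (some current) (some (current + w.length)) ≠ w := by
  intro heq
  have hlen := congrArg List.length heq
  rw [PySem.List.length_slice] at hlen
  have hcb := PySem.List.clampIdx_le L.length (current + w.length)
  have hca : (PySem.List.clampIdx L.length current : Int) =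
      if current < 0 then (L.length : Int) + current else current := by
    obtain ⟨h1, h2⟩ := hr
    unfold PySem.List.clampIdx
    split_ifs <;> omega
  obtain ⟨h1, h2⟩ := hr
  split_ifs at hca <;> omega

-- ===== VERDICT (by name: the statement is the Claim_ definition above) =====
theorem extract_digit_of_string_from_current_as_start_spec :
    Claim_equal_extract_digit_of_string_from_current_as_start := by
  intro string current _hdom hpre
  unfold Spec_extract_digit_of_string_from_current_as_start
  have hr : PySem.Raise.InRange string.toList.length current := hpre
  have hsl : string.toList.length = string.length := String.length_toList
  cases hS : PySem.Str.pyGet? string current with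
  | none =>
    exfalso
    rw [PySem.Str.pyGet?_eq] at hS
    exact (PySem.List.pyGet?_eq_none_iff string.toList current).mp hS hr
  | some ch =>
    have hch : PySem.List.pyGet? string.toList current = some ch := by
      rw [PySem.Str.pyGet?_eq] at hS; exact hS
    have hDictItems : pvDigitDict.items =
        [(['o','n','e'], (1:Int)), (['t','w','o'], 2), (['t','h','r','e','e'], 3),
         (['f','o','u','r'], 4), (['f','i','v','e'], 5), (['s','i','x'], 6),
         (['s','e','v','e','n'], 7), (['e','i','g','h','t'], 8), (['n','i','n','e'], 9)] := by decide
    have gd1 : PySem.Dict.getD pvDigitDict ['o','n','e'] 0 = 1 := by decide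
    have gd2 : PySem.Dict.getD pvDigitDict ['t','w','o'] 0 = 2 := by decide
    have gd3 : PySem.Dict.getD pvDigitDict ['t','h','r','e','e'] 0 = 3 := by decide
    have gd4 : PySem.Dict.getD pvDigitDict ['f','o','u','r'] 0 = 4 := by decide
    have gd5 : PySem.Dict.getD pvDigitDict ['f','i','v','e'] 0 = 5 := by decide
    have gd6 : PySem.Dict.getD pvDigitDict ['s','i','x'] 0 = 6 := by decide
    have gd7 : PySem.Dict.getD pvDigitDict ['s','e','v','e','n'] 0 = 7 := by decide
    have gd8 : PySem.Dict.getD pvDigitDict ['e','i','g','h','t'] 0 = 8 := by decide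
    have gd9 : PySem.Dict.getD pvDigitDict ['n','i','n','e'] 0 = 9 := by decide
    -- dispatch on the first character, as A's tree lookup does
    by_cases ho : ch = 'o'
    · subst ho
      have hdisp : PySem.Dict.get? pvTree 'o' = some [['o','n','e']] := by decide
      have ktwo : ∀ m : Int, PySem.List.slice string.toList (some current) (some m) ≠ ['t','w','o'] :=
        fun m => pv_no_head string.toList current 'o' hch m ['t','w','o'] 't' rfl (by decide)
      have kthree : ∀ m : Int, PySem.List.slice string.toList (some current) (some m) ≠ ['t','h','r','e','e'] :=
        fun m => pv_no_head string.toList current 'o' hch m ['t','h','r','e','e'] 't' rfl (by decide)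
      have kfour : ∀ m : Int, PySem.List.slice string.toList (some current) (some m) ≠ ['f','o','u','r'] :=
        fun m => pv_no_head string.toList current 'o' hch m ['f','o','u','r'] 'f' rfl (by decide)
      have kfive : ∀ m : Int, PySem.List.slice string.toList (some current) (some m) ≠ ['f','i','v','e'] :=
        fun m => pv_no_head string.toList current 'o' hch m ['f','i','v','e'] 'f' rfl (by decide)
      have ksix : ∀ m : Int, PySem.List.slice string.toList (some current) (some m) ≠ ['s','i','x'] :=
        fun m => pv_no_head string.toList current 'o' hch m ['s','i','x'] 's' rfl (by decide)
      have kseven : ∀ m : Int, PySem.List.slice string.toList (some current) (some m) ≠ ['s','e','v','e','n'] :=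
        fun m => pv_no_head string.toList current 'o' hch m ['s','e','v','e','n'] 's' rfl (by decide)
      have keight : ∀ m : Int, PySem.List.slice string.toList (some current) (some m) ≠ ['e','i','g','h','t'] :=
        fun m => pv_no_head string.toList current 'o' hch m ['e','i','g','h','t'] 'e' rfl (by decide)
      have knine : ∀ m : Int, PySem.List.slice string.toList (some current) (some m) ≠ ['n','i','n','e'] :=
        fun m => pv_no_head string.toList current 'o' hch m ['n','i','n','e'] 'n' rfl (by decide)
      by_cases hg1 : (string.length : Int) < current + 3
      · have m1 : PySem.List.slice string.toList (some current) (some (current + 3)) ≠ ['o','n','e'] :=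
          pv_no_len string.toList current ['o','n','e'] hr (by simpa using hg1)
        simp [extract_digit_of_string_from_current_as_start, extract_digit_of_string_from_current_as_start_alt, hch, hdisp, hDictItems, pvLoopA, pvLoopB, hg1, m1, ktwo, kthree, kfour, kfive, ksix, kseven, keight, knine]
      · by_cases he1 : PySem.List.slice string.toList (some current) (some (current + 3)) = ['o','n','e']
        · simp [extract_digit_of_string_from_current_as_start, extract_digit_of_string_from_current_as_start_alt, hch, hdisp, hDictItems, pvLoopA, pvLoopB, hg1, he1, gd1]
        · simp [extract_digit_of_string_from_current_as_start, extract_digit_of_string_from_current_as_start_alt, hch, hdisp, hDictItems, pvLoopA, pvLoopB, hg1, he1, Ne.symm he1, ktwo, kthree, kfour, kfive, ksix, kseven, keight, knine]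
    by_cases ht : ch = 't'
    · subst ht
      have hdisp : PySem.Dict.get? pvTree 't' = some [['t','w','o'], ['t','h','r','e','e']] := by decide
      have kone : ∀ m : Int, PySem.List.slice string.toList (some current) (some m) ≠ ['o','n','e'] :=
        fun m => pv_no_head string.toList current 't' hch m ['o','n','e'] 'o' rfl (by decide)
      have kfour : ∀ m : Int, PySem.List.slice string.toList (some current) (some m) ≠ ['f','o','u','r'] :=
        fun m => pv_no_head string.toList current 't' hch m ['f','o','u','r'] 'f' rfl (by decide)
      have kfive : ∀ m : Int, PySem.List.slice string.toList (some current) (some m) ≠ ['f','i','v','e'] :=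
        fun m => pv_no_head string.toList current 't' hch m ['f','i','v','e'] 'f' rfl (by decide)
      have ksix : ∀ m : Int, PySem.List.slice string.toList (some current) (some m) ≠ ['s','i','x'] :=
        fun m => pv_no_head string.toList current 't' hch m ['s','i','x'] 's' rfl (by decide)
      have kseven : ∀ m : Int, PySem.List.slice string.toList (some current) (some m) ≠ ['s','e','v','e','n'] :=
        fun m => pv_no_head string.toList current 't' hch m ['s','e','v','e','n'] 's' rfl (by decide)
      have keight : ∀ m : Int, PySem.List.slice string.toList (some current) (some m) ≠ ['e','i','g','h','t'] :=
        fun m => pv_no_head string.toList current 't' hch m ['e','i','g','h','t'] 'e' rfl (by decide)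
      have knine : ∀ m : Int, PySem.List.slice string.toList (some current) (some m) ≠ ['n','i','n','e'] :=
        fun m => pv_no_head string.toList current 't' hch m ['n','i','n','e'] 'n' rfl (by decide)
      by_cases hg1 : (string.length : Int) < current + 3
      · have m1 : PySem.List.slice string.toList (some current) (some (current + 3)) ≠ ['t','w','o'] :=
          pv_no_len string.toList current ['t','w','o'] hr (by simpa using hg1)
        have m2 : PySem.List.slice string.toList (some current) (some (current + 5)) ≠ ['t','h','r','e','e'] :=
          pv_no_len string.toList current ['t','h','r','e','e'] hr (by simp; omega)
        simp [extract_digit_of_string_from_current_as_start, extract_digit_of_string_from_current_as_start_alt, hch, hdisp, hDictItems, pvLoopA, pvLoopB, hg1, m1, m2, kone, kfour, kfive, ksix, kseven, keight, knine]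
      · by_cases he1 : PySem.List.slice string.toList (some current) (some (current + 3)) = ['t','w','o']
        · simp [extract_digit_of_string_from_current_as_start, extract_digit_of_string_from_current_as_start_alt, hch, hdisp, hDictItems, pvLoopA, pvLoopB, hg1, he1, gd2]
        · by_cases hg2 : (string.length : Int) < current + 5
          · have m2 : PySem.List.slice string.toList (some current) (some (current + 5)) ≠ ['t','h','r','e','e'] :=
              pv_no_len string.toList current ['t','h','r','e','e'] hr (by simpa using hg2)
            simp [extract_digit_of_string_from_current_as_start, extract_digit_of_string_from_current_as_start_alt, hch, hdisp, hDictItems, pvLoopA, pvLoopB, hg1, hg2, he1, Ne.symm he1, m2, kone, kfour, kfive, ksix, kseven, keight, knine]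
          · by_cases he2 : PySem.List.slice string.toList (some current) (some (current + 5)) = ['t','h','r','e','e']
            · simp [extract_digit_of_string_from_current_as_start, extract_digit_of_string_from_current_as_start_alt, hch, hdisp, hDictItems, pvLoopA, pvLoopB, hg1, hg2, he1, Ne.symm he1, he2, gd3, kone]
            · simp [extract_digit_of_string_from_current_as_start, extract_digit_of_string_from_current_as_start_alt, hch, hdisp, hDictItems, pvLoopA, pvLoopB, hg1, hg2, he1, Ne.symm he1, he2, Ne.symm he2, kone, kfour, kfive, ksix, kseven, keight, knine]
    by_cases hf : ch = 'f'
    · subst hf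
      have hdisp : PySem.Dict.get? pvTree 'f' = some [['f','o','u','r'], ['f','i','v','e']] := by decide
      have kone : ∀ m : Int, PySem.List.slice string.toList (some current) (some m) ≠ ['o','n','e'] :=
        fun m => pv_no_head string.toList current 'f' hch m ['o','n','e'] 'o' rfl (by decide)
      have ktwo : ∀ m : Int, PySem.List.slice string.toList (some current) (some m) ≠ ['t','w','o'] :=
        fun m => pv_no_head string.toList current 'f' hch m ['t','w','o'] 't' rfl (by decide)
      have kthree : ∀ m : Int, PySem.List.slice string.toList (some current) (some m) ≠ ['t','h','r','e','e'] :=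
        fun m => pv_no_head string.toList current 'f' hch m ['t','h','r','e','e'] 't' rfl (by decide)
      have ksix : ∀ m : Int, PySem.List.slice string.toList (some current) (some m) ≠ ['s','i','x'] :=
        fun m => pv_no_head string.toList current 'f' hch m ['s','i','x'] 's' rfl (by decide)
      have kseven : ∀ m : Int, PySem.List.slice string.toList (some current) (some m) ≠ ['s','e','v','e','n'] :=
        fun m => pv_no_head string.toList current 'f' hch m ['s','e','v','e','n'] 's' rfl (by decide)
      have keight : ∀ m : Int, PySem.List.slice string.toList (some current) (some m) ≠ ['e','i','g','h','t'] :=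
        fun m => pv_no_head string.toList current 'f' hch m ['e','i','g','h','t'] 'e' rfl (by decide)
      have knine : ∀ m : Int, PySem.List.slice string.toList (some current) (some m) ≠ ['n','i','n','e'] :=
        fun m => pv_no_head string.toList current 'f' hch m ['n','i','n','e'] 'n' rfl (by decide)
      by_cases hg1 : (string.length : Int) < current + 4
      · have m1 : PySem.List.slice string.toList (some current) (some (current + 4)) ≠ ['f','o','u','r'] :=
          pv_no_len string.toList current ['f','o','u','r'] hr (by simpa using hg1)
        have m2 : PySem.List.slice string.toList (some current) (some (current + 4)) ≠ ['f','i','v','e'] :=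
          pv_no_len string.toList current ['f','i','v','e'] hr (by simp; omega)
        simp [extract_digit_of_string_from_current_as_start, extract_digit_of_string_from_current_as_start_alt, hch, hdisp, hDictItems, pvLoopA, pvLoopB, hg1, m1, m2, kone, ktwo, kthree, ksix, kseven, keight, knine]
      · by_cases he1 : PySem.List.slice string.toList (some current) (some (current + 4)) = ['f','o','u','r']
        · simp [extract_digit_of_string_from_current_as_start, extract_digit_of_string_from_current_as_start_alt, hch, hdisp, hDictItems, pvLoopA, pvLoopB, hg1, he1, gd4, kone, ktwo, kthree]
        · by_cases hg2 : (string.length : Int) < current + 4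
          · have m2 : PySem.List.slice string.toList (some current) (some (current + 4)) ≠ ['f','i','v','e'] :=
              pv_no_len string.toList current ['f','i','v','e'] hr (by simpa using hg2)
            simp [extract_digit_of_string_from_current_as_start, extract_digit_of_string_from_current_as_start_alt, hch, hdisp, hDictItems, pvLoopA, pvLoopB, hg1, he1, Ne.symm he1, m2, Ne.symm m2, kone, ktwo, kthree, ksix, kseven, keight, knine]
          · by_cases he2 : PySem.List.slice string.toList (some current) (some (current + 4)) = ['f','i','v','e']
            · simp [extract_digit_of_string_from_current_as_start, extract_digit_of_string_from_current_as_start_alt, hch, hdisp, hDictItems, pvLoopA, pvLoopB, hg1, he2, gd5, kone, ktwo, kthree]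
            · simp [extract_digit_of_string_from_current_as_start, extract_digit_of_string_from_current_as_start_alt, hch, hdisp, hDictItems, pvLoopA, pvLoopB, hg1, he1, Ne.symm he1, he2, Ne.symm he2, kone, ktwo, kthree, ksix, kseven, keight, knine]
    by_cases hs : ch = 's'
    · subst hs
      have hdisp : PySem.Dict.get? pvTree 's' = some [['s','i','x'], ['s','e','v','e','n']] := by decide
      have kone : ∀ m : Int, PySem.List.slice string.toList (some current) (some m) ≠ ['o','n','e'] :=
        fun m => pv_no_head string.toList current 's' hch m ['o','n','e'] 'o' rfl (by decide)
      have ktwo : ∀ m : Int, PySem.List.slice string.toList (some current) (some m) ≠ ['t','w','o'] :=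
        fun m => pv_no_head string.toList current 's' hch m ['t','w','o'] 't' rfl (by decide)
      have kthree : ∀ m : Int, PySem.List.slice string.toList (some current) (some m) ≠ ['t','h','r','e','e'] :=
        fun m => pv_no_head string.toList current 's' hch m ['t','h','r','e','e'] 't' rfl (by decide)
      have kfour : ∀ m : Int, PySem.List.slice string.toList (some current) (some m) ≠ ['f','o','u','r'] :=
        fun m => pv_no_head string.toList current 's' hch m ['f','o','u','r'] 'f' rfl (by decide)
      have kfive : ∀ m : Int, PySem.List.slice string.toList (some current) (some m) ≠ ['f','i','v','e'] :=
        fun m => pv_no_head string.toList current 's' hch m ['f','i','v','e'] 'f' rfl (by decide)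
      have keight : ∀ m : Int, PySem.List.slice string.toList (some current) (some m) ≠ ['e','i','g','h','t'] :=
        fun m => pv_no_head string.toList current 's' hch m ['e','i','g','h','t'] 'e' rfl (by decide)
      have knine : ∀ m : Int, PySem.List.slice string.toList (some current) (some m) ≠ ['n','i','n','e'] :=
        fun m => pv_no_head string.toList current 's' hch m ['n','i','n','e'] 'n' rfl (by decide)
      by_cases hg1 : (string.length : Int) < current + 3
      · have m1 : PySem.List.slice string.toList (some current) (some (current + 3)) ≠ ['s','i','x'] :=
          pv_no_len string.toList current ['s','i','x'] hr (by simpa using hg1)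
        have m2 : PySem.List.slice string.toList (some current) (some (current + 5)) ≠ ['s','e','v','e','n'] :=
          pv_no_len string.toList current ['s','e','v','e','n'] hr (by simp; omega)
        simp [extract_digit_of_string_from_current_as_start, extract_digit_of_string_from_current_as_start_alt, hch, hdisp, hDictItems, pvLoopA, pvLoopB, hg1, m1, m2, kone, ktwo, kthree, kfour, kfive, keight, knine]
      · by_cases he1 : PySem.List.slice string.toList (some current) (some (current + 3)) = ['s','i','x']
        · simp [extract_digit_of_string_from_current_as_start, extract_digit_of_string_from_current_as_start_alt, hch, hdisp, hDictItems, pvLoopA, pvLoopB, hg1, he1, gd6, kthree, kfour, kfive]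
        · by_cases hg2 : (string.length : Int) < current + 5
          · have m2 : PySem.List.slice string.toList (some current) (some (current + 5)) ≠ ['s','e','v','e','n'] :=
              pv_no_len string.toList current ['s','e','v','e','n'] hr (by simpa using hg2)
            simp [extract_digit_of_string_from_current_as_start, extract_digit_of_string_from_current_as_start_alt, hch, hdisp, hDictItems, pvLoopA, pvLoopB, hg1, hg2, he1, Ne.symm he1, m2, kone, ktwo, kthree, kfour, kfive, keight, knine]
          · by_cases he2 : PySem.List.slice string.toList (some current) (some (current + 5)) = ['s','e','v','e','n']
            · simp [extract_digit_of_string_from_current_as_start, extract_digit_of_string_from_current_as_start_alt, hch, hdisp, hDictItems, pvLoopA, pvLoopB, hg1, hg2, he1, Ne.symm he1, he2, gd7, kone, ktwo, kfour, kfive]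
            · simp [extract_digit_of_string_from_current_as_start, extract_digit_of_string_from_current_as_start_alt, hch, hdisp, hDictItems, pvLoopA, pvLoopB, hg1, hg2, he1, Ne.symm he1, he2, Ne.symm he2, kone, ktwo, kthree, kfour, kfive, keight, knine]
    by_cases he : ch = 'e'
    · subst he
      have hdisp : PySem.Dict.get? pvTree 'e' = some [['e','i','g','h','t']] := by decide
      have kone : ∀ m : Int, PySem.List.slice string.toList (some current) (some m) ≠ ['o','n','e'] :=
        fun m => pv_no_head string.toList current 'e' hch m ['o','n','e'] 'o' rfl (by decide)
      have ktwo : ∀ m : Int, PySem.List.slice string.toList (some current) (some m) ≠ ['t','w','o'] :=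
        fun m => pv_no_head string.toList current 'e' hch m ['t','w','o'] 't' rfl (by decide)
      have kthree : ∀ m : Int, PySem.List.slice string.toList (some current) (some m) ≠ ['t','h','r','e','e'] :=
        fun m => pv_no_head string.toList current 'e' hch m ['t','h','r','e','e'] 't' rfl (by decide)
      have kfour : ∀ m : Int, PySem.List.slice string.toList (some current) (some m) ≠ ['f','o','u','r'] :=
        fun m => pv_no_head string.toList current 'e' hch m ['f','o','u','r'] 'f' rfl (by decide)
      have kfive : ∀ m : Int, PySem.List.slice string.toList (some current) (some m) ≠ ['f','i','v','e'] :=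
        fun m => pv_no_head string.toList current 'e' hch m ['f','i','v','e'] 'f' rfl (by decide)
      have ksix : ∀ m : Int, PySem.List.slice string.toList (some current) (some m) ≠ ['s','i','x'] :=
        fun m => pv_no_head string.toList current 'e' hch m ['s','i','x'] 's' rfl (by decide)
      have kseven : ∀ m : Int, PySem.List.slice string.toList (some current) (some m) ≠ ['s','e','v','e','n'] :=
        fun m => pv_no_head string.toList current 'e' hch m ['s','e','v','e','n'] 's' rfl (by decide)
      have knine : ∀ m : Int, PySem.List.slice string.toList (some current) (some m) ≠ ['n','i','n','e'] :=
        fun m => pv_no_head string.toList current 'e' hch m ['n','i','n','e'] 'n' rfl (by decide)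
      by_cases hg1 : (string.length : Int) < current + 5
      · have m1 : PySem.List.slice string.toList (some current) (some (current + 5)) ≠ ['e','i','g','h','t'] :=
          pv_no_len string.toList current ['e','i','g','h','t'] hr (by simpa using hg1)
        simp [extract_digit_of_string_from_current_as_start, extract_digit_of_string_from_current_as_start_alt, hch, hdisp, hDictItems, pvLoopA, pvLoopB, hg1, m1, kone, ktwo, kthree, kfour, kfive, ksix, kseven, knine]
      · by_cases he1 : PySem.List.slice string.toList (some current) (some (current + 5)) = ['e','i','g','h','t']
        · simp [extract_digit_of_string_from_current_as_start, extract_digit_of_string_from_current_as_start_alt, hch, hdisp, hDictItems, pvLoopA, pvLoopB, hg1, he1, gd8, kone, ktwo, kfour, kfive, ksix]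
        · simp [extract_digit_of_string_from_current_as_start, extract_digit_of_string_from_current_as_start_alt, hch, hdisp, hDictItems, pvLoopA, pvLoopB, hg1, he1, Ne.symm he1, kone, ktwo, kthree, kfour, kfive, ksix, kseven, knine]
    by_cases hn : ch = 'n'
    · subst hn
      have hdisp : PySem.Dict.get? pvTree 'n' = some [['n','i','n','e']] := by decide
      have kone : ∀ m : Int, PySem.List.slice string.toList (some current) (some m) ≠ ['o','n','e'] :=
        fun m => pv_no_head string.toList current 'n' hch m ['o','n','e'] 'o' rfl (by decide)
      have ktwo : ∀ m : Int, PySem.List.slice string.toList (some current) (some m) ≠ ['t','w','o'] :=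
        fun m => pv_no_head string.toList current 'n' hch m ['t','w','o'] 't' rfl (by decide)
      have kthree : ∀ m : Int, PySem.List.slice string.toList (some current) (some m) ≠ ['t','h','r','e','e'] :=
        fun m => pv_no_head string.toList current 'n' hch m ['t','h','r','e','e'] 't' rfl (by decide)
      have kfour : ∀ m : Int, PySem.List.slice string.toList (some current) (some m) ≠ ['f','o','u','r'] :=
        fun m => pv_no_head string.toList current 'n' hch m ['f','o','u','r'] 'f' rfl (by decide)
      have kfive : ∀ m : Int, PySem.List.slice string.toList (some current) (some m) ≠ ['f','i','v','e'] :=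
        fun m => pv_no_head string.toList current 'n' hch m ['f','i','v','e'] 'f' rfl (by decide)
      have ksix : ∀ m : Int, PySem.List.slice string.toList (some current) (some m) ≠ ['s','i','x'] :=
        fun m => pv_no_head string.toList current 'n' hch m ['s','i','x'] 's' rfl (by decide)
      have kseven : ∀ m : Int, PySem.List.slice string.toList (some current) (some m) ≠ ['s','e','v','e','n'] :=
        fun m => pv_no_head string.toList current 'n' hch m ['s','e','v','e','n'] 's' rfl (by decide)
      have keight : ∀ m : Int, PySem.List.slice string.toList (some current) (some m) ≠ ['e','i','g','h','t'] :=
        fun m => pv_no_head string.toList current 'n' hch m ['e','i','g','h','t'] 'e' rfl (by decide)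
      by_cases hg1 : (string.length : Int) < current + 4
      · have m1 : PySem.List.slice string.toList (some current) (some (current + 4)) ≠ ['n','i','n','e'] :=
          pv_no_len string.toList current ['n','i','n','e'] hr (by simpa using hg1)
        simp [extract_digit_of_string_from_current_as_start, extract_digit_of_string_from_current_as_start_alt, hch, hdisp, hDictItems, pvLoopA, pvLoopB, hg1, m1, kone, ktwo, kthree, kfour, kfive, ksix, kseven, keight]
      · by_cases he1 : PySem.List.slice string.toList (some current) (some (current + 4)) = ['n','i','n','e']
        · simp [extract_digit_of_string_from_current_as_start, extract_digit_of_string_from_current_as_start_alt, hch, hdisp, hDictItems, pvLoopA, pvLoopB, hg1, he1, gd9, kone, ktwo, kthree, ksix, kseven, keight]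
        · simp [extract_digit_of_string_from_current_as_start, extract_digit_of_string_from_current_as_start_alt, hch, hdisp, hDictItems, pvLoopA, pvLoopB, hg1, he1, Ne.symm he1, kone, ktwo, kthree, kfour, kfive, ksix, kseven, keight]
    · -- char not in digit_string_tree: A returns None; no word matches for B either
      have ho' : ¬('o' = ch) := Ne.symm ho
      have ht' : ¬('t' = ch) := Ne.symm ht
      have hf' : ¬('f' = ch) := Ne.symm hf
      have hs' : ¬('s' = ch) := Ne.symm hs
      have he' : ¬('e' = ch) := Ne.symm he
      have hn' : ¬('n' = ch) := Ne.symm hn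
      have hTreeItems : pvTree.items =
          [('o', [['o','n','e']]), ('t', [['t','w','o'], ['t','h','r','e','e']]),
           ('f', [['f','o','u','r'], ['f','i','v','e']]), ('s', [['s','i','x'], ['s','e','v','e','n']]),
           ('e', [['e','i','g','h','t']]), ('n', [['n','i','n','e']])] := by decide
      have hdisp : PySem.Dict.get? pvTree ch = none := by
        have bo : ('o' == ch) = false := by simp [ho']
        have bt : ('t' == ch) = false := by simp [ht']
        have bf : ('f' == ch) = false := by simp [hf']
        have bs : ('s' == ch) = false := by simp [hs']
        have be : ('e' == ch) = false := by simp [he']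
        have bn : ('n' == ch) = false := by simp [hn']
        simp only [PySem.Dict.get?, hTreeItems]
        simp [List.find?, bo, bt, bf, bs, be, bn]
      have kone : ∀ m : Int, PySem.List.slice string.toList (some current) (some m) ≠ ['o','n','e'] :=
        fun m => pv_no_head string.toList current ch hch m ['o','n','e'] 'o' rfl ho'
      have ktwo : ∀ m : Int, PySem.List.slice string.toList (some current) (some m) ≠ ['t','w','o'] :=
        fun m => pv_no_head string.toList current ch hch m ['t','w','o'] 't' rfl ht'
      have kthree : ∀ m : Int, PySem.List.slice string.toList (some current) (some m) ≠ ['t','h','r','e','e'] :=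
        fun m => pv_no_head string.toList current ch hch m ['t','h','r','e','e'] 't' rfl ht'
      have kfour : ∀ m : Int, PySem.List.slice string.toList (some current) (some m) ≠ ['f','o','u','r'] :=
        fun m => pv_no_head string.toList current ch hch m ['f','o','u','r'] 'f' rfl hf'
      have kfive : ∀ m : Int, PySem.List.slice string.toList (some current) (some m) ≠ ['f','i','v','e'] :=
        fun m => pv_no_head string.toList current ch hch m ['f','i','v','e'] 'f' rfl hf'
      have ksix : ∀ m : Int, PySem.List.slice string.toList (some current) (some m) ≠ ['s','i','x'] :=
        fun m => pv_no_head string.toList current ch hch m ['s','i','x'] 's' rfl hs'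
      have kseven : ∀ m : Int, PySem.List.slice string.toList (some current) (some m) ≠ ['s','e','v','e','n'] :=
        fun m => pv_no_head string.toList current ch hch m ['s','e','v','e','n'] 's' rfl hs'
      have keight : ∀ m : Int, PySem.List.slice string.toList (some current) (some m) ≠ ['e','i','g','h','t'] :=
        fun m => pv_no_head string.toList current ch hch m ['e','i','g','h','t'] 'e' rfl he'
      have knine : ∀ m : Int, PySem.List.slice string.toList (some current) (some m) ≠ ['n','i','n','e'] :=
        fun m => pv_no_head string.toList current ch hch m ['n','i','n','e'] 'n' rfl hn'
      simp [extract_digit_of_string_from_current_as_start, extract_digit_of_string_from_current_as_start_alt, hch, hdisp, hDictItems, pvLoopB, kone, ktwo, kthree, kfour, kfive, ksix, kseven, keight, knine]
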